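-- pv_equiv track=rewrite | github.com/Krishn1101/Problems-on-Python | Red_OR_Green.py | RedOrGreen
-- ===== SOURCE A (Python) =====
-- def RedOrGreen(N,S):
--     freq = {}
--     for i in S:
--         if i not in freq:
--             freq[i] = 1
--         else:
--             freq[i] += 1
--     if len(freq) == 1:
--         return 0
--     mn = min(freq.values())
--     return mn
-- ===== SOURCE B (Python) =====
-- def RedOrGreen(N, S):
--     # Sort the characters so equal characters form contiguous runs,
--     # then scan once collecting run lengths.
--     t = sorted(S)
--     lengths = []
--     i, n = 0, len(t)
--     while i < n:
--         j = i
--         while j < n and t[j] == t[i]: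
--             j += 1
--         lengths.append(j - i)
--         i = j
--     if len(lengths) == 1:
--         return 0
--     return min(lengths)
-- ===== Notes on version B (the rewrite author's own statement) =====
-- stated objective: alternative
-- what changed: Replaces the dict-counting pass (hash map of character frequencies, then min over its values) with sort-then-scan: sort the characters and collect run lengths in one linear sweep, returning 0 for a single run and min of the run lengths otherwise; the empty string (where A's min(freq.values()) raises ValueError, and B's min(lengths) raises too) is excluded by Pre_.
import Mathlib
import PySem

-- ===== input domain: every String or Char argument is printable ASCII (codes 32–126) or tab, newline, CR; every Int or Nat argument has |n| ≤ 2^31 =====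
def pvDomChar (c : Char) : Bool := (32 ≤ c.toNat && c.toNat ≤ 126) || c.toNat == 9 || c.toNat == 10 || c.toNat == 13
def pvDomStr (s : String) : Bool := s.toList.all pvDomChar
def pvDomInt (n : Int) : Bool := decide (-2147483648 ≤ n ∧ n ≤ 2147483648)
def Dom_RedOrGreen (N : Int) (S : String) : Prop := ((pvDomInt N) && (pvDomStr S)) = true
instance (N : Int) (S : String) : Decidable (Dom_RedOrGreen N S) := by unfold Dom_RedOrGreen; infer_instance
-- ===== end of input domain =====

-- ===== PORT A =====
-- B replaces A's dict-counting pass by sort-then-run-scan; equal return values proved on nonempty strings (A raises ValueError on "").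
def RedOrGreen (N : Int) (S : String) : Int :=
  let freq := S.toList.foldl
    (fun d i => if d.contains i then d.insert i (d.getD i 0 + 1) else d.insert i 1)
    PySem.Dict.empty
  if freq.size == 1 then 0
  else (PySem.List.min? freq.values id).getD 0  -- min(freq.values()); Pre_ excludes the empty dict (Python raises there)

-- ===== PORT B =====
-- run lengths of the sorted character list (the inner `while t[j] == t[i]` scan of one run)
def pvRuns : List Char → List Int
  | [] => []
  | c :: cs =>
    ((1 : Int) + (cs.takeWhile (· == c)).length) :: pvRuns (cs.dropWhile (· == c))
termination_by l => l.length
decreasing_by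
  simpa using Nat.lt_succ_of_le (List.length_dropWhile_le _ _)

def RedOrGreen_alt (N : Int) (S : String) : Int :=
  let lengths := pvRuns (PySem.List.sorted S.toList id)
  if lengths.length == 1 then 0
  else (PySem.List.min? lengths id).getD 0  -- min(lengths); Pre_ excludes the empty list (Python raises there)

-- ===== PRECONDITION & SPEC =====
-- Pre_ excludes exactly the empty string, on which A's `min(freq.values())` raises ValueError (B raises there too).
def Pre_RedOrGreen (N : Int) (S : String) : Prop := S.toList ≠ []
instance (N : Int) (S : String) : Decidable (Pre_RedOrGreen N S) := by unfold Pre_RedOrGreen; infer_instance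
def pvWitness_RedOrGreen : Int × String := (3, "aab")

def Spec_RedOrGreen (N : Int) (S : String) (out : Int) : Prop := out = RedOrGreen_alt N S
instance (N : Int) (S : String) (out : Int) : Decidable (Spec_RedOrGreen N S out) := by unfold Spec_RedOrGreen; infer_instance

-- ===== CLAIM (what is proved, stated in full; the proofs are below) =====
def Claim_equal_RedOrGreen : Prop := ∀ (N : Int) (S : String), Dom_RedOrGreen N S → Pre_RedOrGreen N S → Spec_RedOrGreen N S (RedOrGreen N S)

-- ===== LEMMAS AND PROOFS =====

-- first-occurrence-distinct elements (used only to state the proofs' invariants)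
def pvKeys : List Char → List Char
  | [] => []
  | c :: cs => c :: pvKeys (cs.filter (· ≠ c))
termination_by l => l.length
decreasing_by
  simp only [List.length_cons, List.length_unattach]
  exact Nat.lt_succ_of_le (le_trans (List.length_filter_le _ _) (by simp))

theorem pvKeys_nil : pvKeys [] = [] := by simp [pvKeys]

theorem pvKeys_cons (c : Char) (cs : List Char) :
    pvKeys (c :: cs) = c :: pvKeys (cs.filter (· ≠ c)) := by simp [pvKeys]

theorem pvRuns_nil : pvRuns [] = [] := by simp [pvRuns]

theorem pvRuns_cons (c : Char) (cs : List Char) :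
    pvRuns (c :: cs)
      = ((1 : Int) + (cs.takeWhile (· == c)).length) :: pvRuns (cs.dropWhile (· == c)) := by
  simp [pvRuns]

theorem pvKeys_mem (m : List Char) (x : Char) : x ∈ pvKeys m ↔ x ∈ m := by
  match m with
  | [] => simp [pvKeys_nil]
  | c :: cs =>
    rw [pvKeys_cons]
    simp only [List.mem_cons, pvKeys_mem (cs.filter (· ≠ c)) x, List.mem_filter,
      ne_eq, decide_eq_true_eq]
    constructor
    · rintro (rfl | ⟨h, _⟩)
      · simp
      · simp [h]
    · rintro (rfl | h)
      · left; rfl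
      · by_cases hc : x = c
        · left; exact hc
        · right; exact ⟨h, hc⟩
termination_by m.length
decreasing_by simpa using Nat.lt_succ_of_le (List.length_filter_le _ _)

theorem pvKeys_nodup (m : List Char) : (pvKeys m).Nodup := by
  match m with
  | [] => simp [pvKeys_nil]
  | c :: cs =>
    rw [pvKeys_cons]
    refine List.nodup_cons.mpr ⟨?_, pvKeys_nodup (cs.filter (· ≠ c))⟩
    intro hmem
    have := (pvKeys_mem _ _).mp hmem
    simp at this
termination_by m.length
decreasing_by simpa using Nat.lt_succ_of_le (List.length_filter_le _ _)

-- A's branchy counting loop is the standard counter fold.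
theorem pvFreq_eq_counter (l : List Char) :
    l.foldl (fun d i => if d.contains i then d.insert i (d.getD i 0 + 1) else d.insert i 1)
      PySem.Dict.empty = PySem.Dict.counter l := by
  have hf : (fun (d : PySem.Dict Char Int) i =>
      if d.contains i then d.insert i (d.getD i 0 + 1) else d.insert i 1)
      = fun d x => d.insert x (d.getD x 0 + 1) := by
    funext d i
    by_cases h : d.contains i
    · simp [h]
    · rw [if_neg (by simpa using h),
        PySem.Dict.getD_of_not_contains d 0 (by simpa using h)]
      norm_num
  rw [hf, PySem.Dict.foldl_insert_getD_add_one_eq_counter]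

-- run lengths of a ≤-sorted list are the counts of its first-occurrence-distinct elements
theorem pvRuns_sorted (m : List Char) (h : List.Pairwise (· ≤ ·) m) :
    pvRuns m = (pvKeys m).map (fun c => (m.count c : Int)) := by
  match m, h with
  | [], _ => simp [pvRuns_nil, pvKeys_nil]
  | c :: cs, h =>
    have hcs : ∀ x ∈ cs, c ≤ x := (List.pairwise_cons.mp h).1
    have hp : List.Pairwise (· ≤ ·) cs := (List.pairwise_cons.mp h).2
    set take := cs.takeWhile (· == c) with htake
    set drop := cs.dropWhile (· == c) with hdrop
    have hsplit : cs = take ++ drop := (List.takeWhile_append_dropWhile).symm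
    have htc : ∀ x ∈ take, x = c := by
      intro x hx
      simpa using List.mem_takeWhile_imp hx
    have hdp : List.Pairwise (· ≤ ·) drop :=
      hp.sublist (List.dropWhile_sublist _)
    have hcd : c ∉ drop := by
      intro hcmem
      cases hd : drop with
      | nil => rw [hd] at hcmem; simp at hcmem
      | cons e rest =>
        have he : ¬ (e == c) = true := by
          have := List.head?_dropWhile_not (· == c) cs
          rw [← hdrop, hd] at this
          simpa using this
        have hec : e ≠ c := by simpa using he
        have hce : c ≤ e := by
          apply hcs
          rw [hsplit, hd]; simp
        have hlt : c < e := lt_of_le_of_ne hce (Ne.symm hec)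
        rw [hd] at hcmem
        rcases List.mem_cons.mp hcmem with h1 | h1
        · exact hec h1.symm
        · have : e ≤ c := by
            rw [hd] at hdp
            exact (List.pairwise_cons.mp hdp).1 c h1
          exact absurd hlt (not_lt.mpr this)
    have hcount_take : take.count c = take.length := by
      rw [List.count_eq_length]
      intro b hb; exact (htc b hb).symm
    have hcount_drop : drop.count c = 0 := List.count_eq_zero.mpr hcd
    have hfilter : cs.filter (· ≠ c) = drop := by
      rw [hsplit, List.filter_append]
      have h1 : take.filter (· ≠ c) = [] := by
        rw [List.filter_eq_nil_iff]
        intro a ha; simp [htc a ha]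
      have h2 : drop.filter (· ≠ c) = drop := by
        rw [List.filter_eq_self]
        intro a ha
        simp only [ne_eq, decide_eq_true_eq]
        intro hac; exact hcd (hac ▸ ha)
      rw [h1, h2, List.nil_append]
    have hcnt : ((c :: cs).count c : Int) = 1 + (take.length : Int) := by
      rw [List.count_cons_self, hsplit, List.count_append, hcount_take, hcount_drop]
      push_cast; ring
    rw [pvRuns_cons, pvKeys_cons, hfilter, List.map_cons, pvRuns_sorted drop hdp, ← hcnt]
    congr 1
    apply List.map_congr_left
    intro d hd
    have hdmem : d ∈ drop := (pvKeys_mem _ _).mp hd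
    have hdc : d ≠ c := fun hh => hcd (hh ▸ hdmem)
    have : (c :: cs).count d = drop.count d := by
      rw [List.count_cons_of_ne hdc.symm, hsplit, List.count_append]
      have : take.count d = 0 := by
        rw [List.count_eq_zero]
        intro hdt; exact hdc (htc d hdt)
      omega
    rw [this]
termination_by m.length
decreasing_by simpa using Nat.lt_succ_of_le (List.length_dropWhile_le _ _)

-- the two count lists are permutations of each other
theorem pvVals_perm (l : List Char) :
    ((PySem.Set.ofList l).map (fun k => (l.count k : Int))).Perm
      (pvRuns (PySem.List.sorted l id)) := by
  set t := PySem.List.sorted l id with ht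
  have hperm : t.Perm l := PySem.List.sorted_perm l id false
  have hsorted : List.Pairwise (· ≤ ·) t := by
    have := PySem.List.sorted_pairwise l (id : Char → Char)
    simpa using this
  rw [pvRuns_sorted t hsorted]
  have hcnt : (pvKeys t).map (fun c => (t.count c : Int))
      = (pvKeys t).map (fun c => (l.count c : Int)) := by
    apply List.map_congr_left
    intro d _
    rw [hperm.count_eq]
  rw [hcnt]
  apply List.Perm.map
  rw [List.perm_ext_iff_of_nodup (PySem.Set.nodup_ofList l) (pvKeys_nodup t)]
  intro a
  rw [PySem.Set.mem_ofList, pvKeys_mem, hperm.mem_iff]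

-- PySem min? of Int lists is permutation-invariant
theorem pvMin_perm (xs ys : List Int) (h : xs.Perm ys) :
    PySem.List.min? xs id = PySem.List.min? ys id := by
  cases hx : PySem.List.min? xs id with
  | none =>
    have hxe : xs = [] := (PySem.List.min?_eq_none_iff xs id).mp hx
    subst hxe
    rw [h.symm.eq_nil]
    exact ((PySem.List.min?_eq_none_iff ([] : List Int) id).mpr rfl).symm
  | some a =>
    cases hy : PySem.List.min? ys id with
    | none =>
      have hye : ys = [] := (PySem.List.min?_eq_none_iff ys id).mp hy
      subst hye
      rw [h.eq_nil] at hx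
      rw [(PySem.List.min?_eq_none_iff ([] : List Int) id).mpr rfl] at hx
      exact absurd hx (by simp)
    | some b =>
      have ha : a ∈ xs := PySem.List.min?_mem hx
      have hb : b ∈ ys := PySem.List.min?_mem hy
      have h1 : b ≤ a := PySem.List.min?_id_le hy a (h.mem_iff.mp ha)
      have h2 : a ≤ b := PySem.List.min?_id_le hx b (h.mem_iff.mpr hb)
      rw [le_antisymm h2 h1]

-- ===== VERDICT (by name: the statement is the Claim_ definition above) =====
theorem RedOrGreen_spec : Claim_equal_RedOrGreen := by
  intro N S _ _
  unfold Spec_RedOrGreen RedOrGreen RedOrGreen_alt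
  rw [pvFreq_eq_counter]
  have P := pvVals_perm S.toList
  have hvals : (PySem.Dict.counter S.toList).values
      = (PySem.Set.ofList S.toList).map (fun k => (S.toList.count k : Int)) := by
    show ((PySem.Dict.counter S.toList).items.map (·.2)) = _
    rw [PySem.Dict.items_counter, List.map_map]
    rfl
  have hsize : (PySem.Dict.counter S.toList).size
      = (pvRuns (PySem.List.sorted S.toList id)).length := by
    show (PySem.Dict.counter S.toList).items.length = _
    rw [PySem.Dict.items_counter]
    have := P.length_eq
    simpa using this
  simp only [hsize]
  by_cases h1 : ((pvRuns (PySem.List.sorted S.toList id)).length == 1) = true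
  · simp [h1]
  · simp only [h1, if_false, Bool.false_eq_true]
    rw [hvals, pvMin_perm _ _ P]
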